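-- pv_equiv track=rewrite | github.com/phutharesuanwachirapisut/Ph_Python | 229223/HW10/Lab10_1_651610348.py | bean_count
-- ===== SOURCE A (Python) =====
-- def bean_count(n):
--     x = 0
--     if n % 100 == 0 or n <= 0: # เป็น 100
--         x = 0
--     else:
--         n = n % 100
--         for i in range(1,n+1):
--             if (i % 10) == 0: # เป็น 10
--                 x += -5
--             else: # เป็นหลักหน่วย
--                 x += 1
--     return x
-- ===== SOURCE B (Python) =====
-- def bean_count(n):
--     if n % 100 == 0 or n <= 0:
--         return 0
--     m = n % 100
--     return m - 6 * (m // 10)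
-- ===== Notes on version B (the rewrite author's own statement) =====
-- stated objective: simpler
-- what changed: Replaced the 1..n%100 loop with the closed form m - 6*(m//10), since each of the m numbers adds 1 except the m//10 multiples of ten which swing by -6 each.
import Mathlib
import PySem

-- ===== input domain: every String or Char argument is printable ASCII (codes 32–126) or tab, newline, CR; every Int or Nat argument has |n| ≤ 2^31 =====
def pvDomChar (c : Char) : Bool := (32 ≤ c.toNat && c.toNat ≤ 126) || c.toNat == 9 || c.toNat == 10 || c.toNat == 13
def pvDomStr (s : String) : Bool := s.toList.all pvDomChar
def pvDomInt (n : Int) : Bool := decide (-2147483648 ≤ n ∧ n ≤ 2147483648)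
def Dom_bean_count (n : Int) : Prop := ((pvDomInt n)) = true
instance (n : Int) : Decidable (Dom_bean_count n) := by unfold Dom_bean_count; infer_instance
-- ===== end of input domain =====

set_option maxRecDepth 4096


-- B replaces A's per-number loop by the closed form m - 6*(m//10); objective: simpler.

-- ===== PORT A =====
def bean_count (n : Int) : Int :=
  let x : Int := 0
  if PySem.Int.mod n 100 = 0 ∨ n ≤ 0 then
    x
  else
    let n := PySem.Int.mod n 100
    (PySem.List.pyRange 1 (n + 1) 1).foldl
      (fun x i => if PySem.Int.mod i 10 = 0 then x + (-5) else x + 1) x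

-- ===== PORT B =====
def bean_count_alt (n : Int) : Int :=
  if PySem.Int.mod n 100 = 0 ∨ n ≤ 0 then 0
  else
    let m := PySem.Int.mod n 100
    m - 6 * PySem.Int.floordiv m 10

-- ===== PRECONDITION & SPEC =====
def Spec_bean_count (n : Int) (out : Int) : Prop := out = bean_count_alt n
instance (n : Int) (out : Int) : Decidable (Spec_bean_count n out) := by unfold Spec_bean_count; infer_instance

-- ===== CLAIM (what is proved, stated in full; the proofs are below) =====
def Claim_equal_bean_count : Prop := ∀ (n : Int), Dom_bean_count n → Spec_bean_count n (bean_count n)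

-- ===== LEMMAS AND PROOFS =====

-- The body of A's else-branch as a function of the residue m, and of B's.
def pvLoopA (m : Int) : Int :=
  (PySem.List.pyRange 1 (m + 1) 1).foldl
    (fun x i => if PySem.Int.mod i 10 = 0 then x + (-5) else x + 1) 0

-- For every residue 0 ≤ m < 100 the loop equals the closed form (finite check).
theorem pvLoop_eq_closed : ∀ k ∈ List.range 100,
    pvLoopA (k : Int) = (k : Int) - 6 * PySem.Int.floordiv (k : Int) 10 := by decide

theorem pvMod_range (n : Int) : 0 ≤ PySem.Int.mod n 100 ∧ PySem.Int.mod n 100 < 100 := by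
  simp [PySem.Int.mod]
  constructor
  · exact Int.fmod_nonneg_of_pos n (by norm_num)
  · exact Int.fmod_lt_of_pos n (by norm_num)

-- ===== VERDICT (by name: the statement is the Claim_ definition above) =====
theorem bean_count_spec : Claim_equal_bean_count := by
  intro n _
  unfold Spec_bean_count bean_count bean_count_alt
  split
  · rfl
  · have h := pvMod_range n
    have hk : ∃ k : Nat, k < 100 ∧ (k : Int) = PySem.Int.mod n 100 := by
      refine ⟨(PySem.Int.mod n 100).toNat, ?_, ?_⟩ <;> omega
    obtain ⟨k, hk100, hkeq⟩ := hk
    have := pvLoop_eq_closed k (List.mem_range.mpr hk100)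
    simpa [pvLoopA, hkeq] using this
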